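-- pv_equiv track=rewrite | github.com/cgcardona/muse | muse/cli/commands/invariants.py | _parse_toml_rules
-- ===== SOURCE A (Python) =====
-- def _parse_toml_rules(text: str) -> list[dict[str, str]]:
--     """Minimal TOML parser for [[rules]] sections (no external dependencies).
--
--     Parses key = "value" lines within [[rules]] blocks.  Does not support
--     nested tables, arrays, or multi-line strings — the invariants format is
--     intentionally simple.
--     """
--     rules: list[dict[str, str]] = []
--     current: dict[str, str] | None = None
--     for line in text.splitlines():
--         line = line.strip()
--         if line == "[[rules]]":
--             if current is not None:
--                 rules.append(current)
--             current = {}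
--             continue
--         if current is not None and "=" in line and not line.startswith("#"):
--             key, _, val = line.partition("=")
--             key = key.strip()
--             val = val.strip().strip('"').strip("'")
--             current[key] = val
--     if current is not None:
--         rules.append(current)
--     return rules
-- ===== SOURCE B (Python) =====
-- def _parse_toml_rules(text: str) -> list[dict[str, str]]:
--     """Two-pass re-implementation: first group the stripped lines into
--     [[rules]] blocks, then map each block to its key/value dict."""
--     blocks: list[list[str]] = []
--     for raw in text.splitlines():
--         line = raw.strip()
--         if line == "[[rules]]":
--             blocks.append([])
--         elif blocks:
--             blocks[-1].append(line)
--     return [_parse_block(block) for block in blocks]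
--
--
-- def _parse_block(block: list[str]) -> dict[str, str]:
--     d: dict[str, str] = {}
--     for line in block:
--         if "=" in line and not line.startswith("#"):
--             key, _, val = line.partition("=")
--             d[key.strip()] = val.strip().strip('"').strip("'")
--     return d
-- ===== Notes on version B (the rewrite author's own statement) =====
-- stated objective: alternative
-- what changed: A parses in a single streaming pass holding an optional current dict; B first groups the stripped lines into [[rules]] blocks and then maps each block to a dict in a separate pass.
import Mathlib
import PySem

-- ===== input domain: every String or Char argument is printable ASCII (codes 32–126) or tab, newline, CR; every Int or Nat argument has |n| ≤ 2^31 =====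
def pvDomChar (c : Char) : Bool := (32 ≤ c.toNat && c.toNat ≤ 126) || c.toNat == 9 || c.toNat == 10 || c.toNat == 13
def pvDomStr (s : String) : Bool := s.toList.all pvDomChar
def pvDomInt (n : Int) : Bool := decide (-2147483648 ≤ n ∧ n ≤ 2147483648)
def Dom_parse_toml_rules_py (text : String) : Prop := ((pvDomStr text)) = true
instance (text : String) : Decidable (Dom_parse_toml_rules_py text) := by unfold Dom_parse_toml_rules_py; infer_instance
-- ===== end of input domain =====

-- B replaces A's single-pass optional-current-dict scan by a two-pass shape
-- (group stripped lines into blocks, then map each block to a dict): alternative decomposition, same cost.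


-- shared per-line pieces (identical in both Python sources, so shared here):
-- '"=" in line and not line.startswith("#")'
def pvIsKV (line : String) : Bool :=
  PySem.Str.isIn "=" line && !(PySem.Str.startswith line "#")

-- 'key, _, val = line.partition("="); key.strip(), val.strip().strip('"').strip("'")'
-- partition ported by hand: "=" is a single character, so the first-occurrence split is span at '='.
def pvLineKV (line : String) : String × String :=
  let cs := line.toList
  let key := PySem.Chars.strip (cs.takeWhile (· ≠ '='))
  let val := PySem.Chars.stripChars (PySem.Chars.stripChars (PySem.Chars.strip ((cs.dropWhile (· ≠ '=')).drop 1)) ['"']) ['\'']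
  (String.ofList key, String.ofList val)

-- ===== PORT A =====
-- A's loop body: state = (rules, current)
def pvStepA (st : List (PySem.Dict String String) × Option (PySem.Dict String String)) (raw : String) :
    List (PySem.Dict String String) × Option (PySem.Dict String String) :=
  let line := PySem.Str.strip raw
  if line = "[[rules]]" then
    ((match st.2 with
      | some d => st.1 ++ [d]
      | none => st.1), some PySem.Dict.empty)
  else
    match st.2 with
    | some d =>
        if pvIsKV line then (st.1, some (d.insert (pvLineKV line).1 (pvLineKV line).2)) else st
    | none => st

def parse_toml_rules_py (text : String) : List (List (String × String)) :=
  let st := (PySem.Str.splitlines text).foldl pvStepA ([], none)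
  (match st.2 with
   | some d => st.1 ++ [d]
   | none => st.1).map PySem.Dict.items

-- ===== PORT B =====
-- first pass: group stripped lines into blocks ('blocks.append([])' / 'blocks[-1].append(line)')
def pvStepB (blocks : List (List String)) (raw : String) : List (List String) :=
  let line := PySem.Str.strip raw
  if line = "[[rules]]" then blocks ++ [[]]
  else if blocks.isEmpty then blocks
  else blocks.dropLast ++ [blocks.getLastD [] ++ [line]]

-- second pass: '_parse_block'
def pvParseBlock (block : List String) : PySem.Dict String String :=
  block.foldl
    (fun d line => if pvIsKV line then d.insert (pvLineKV line).1 (pvLineKV line).2 else d)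
    PySem.Dict.empty

def parse_toml_rules_py_alt (text : String) : List (List (String × String)) :=
  (((PySem.Str.splitlines text).foldl pvStepB []).map pvParseBlock).map PySem.Dict.items

-- ===== PRECONDITION & SPEC =====
def Spec_parse_toml_rules_py (text : String) (out : List (List (String × String))) : Prop := out = parse_toml_rules_py_alt text
instance (text : String) (out : List (List (String × String))) : Decidable (Spec_parse_toml_rules_py text out) := by unfold Spec_parse_toml_rules_py; infer_instance

-- ===== CLAIM (what is proved, stated in full; the proofs are below) =====
def Claim_equal_parse_toml_rules_py : Prop := ∀ (text : String), Dom_parse_toml_rules_py text → Spec_parse_toml_rules_py text (parse_toml_rules_py text)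

-- ===== LEMMAS AND PROOFS =====

-- invariant linking A's (rules, current) state to B's list of blocks
def pvRel (st : List (PySem.Dict String String) × Option (PySem.Dict String String))
    (blocks : List (List String)) : Prop :=
  (blocks = [] → st = ([], none)) ∧
  (blocks ≠ [] → st.1 = blocks.dropLast.map pvParseBlock ∧ st.2 = some (pvParseBlock (blocks.getLastD [])))

theorem pvParseBlock_concat (blk : List String) (line : String) :
    pvParseBlock (blk ++ [line]) =
      if pvIsKV line then (pvParseBlock blk).insert (pvLineKV line).1 (pvLineKV line).2
      else pvParseBlock blk := by
  simp [pvParseBlock, List.foldl_append]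

-- dropLast + last block, mapped, is all blocks mapped
theorem pvMapLast (f : List String → PySem.Dict String String) (blocks : List (List String))
    (hb : blocks ≠ []) :
    blocks.dropLast.map f ++ [f (blocks.getLastD [])] = blocks.map f := by
  induction blocks with
  | nil => exact absurd rfl hb
  | cons b bs ih =>
    cases bs with
    | nil => simp
    | cons c cs => simpa using ih (by simp)

theorem pvRel_step (st : List (PySem.Dict String String) × Option (PySem.Dict String String))
    (blocks : List (List String)) (raw : String) (h : pvRel st blocks) :
    pvRel (pvStepA st raw) (pvStepB blocks raw) := by
  by_cases hb : blocks = []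
  · subst hb
    obtain rfl : st = ([], none) := h.1 rfl
    by_cases hm : PySem.Str.strip raw = "[[rules]]"
    · exact ⟨fun hc => absurd hc (by simp [pvStepB, hm]),
        fun _ => by simp [pvStepA, pvStepB, hm, pvParseBlock]⟩
    · exact ⟨fun _ => by simp [pvStepA, hm],
        fun hne => absurd (by simp [pvStepB, hm]) hne⟩
  · obtain ⟨h1, h2⟩ := h.2 hb
    by_cases hm : PySem.Str.strip raw = "[[rules]]"
    · have hA : pvStepA st raw = (st.1 ++ [pvParseBlock (blocks.getLastD [])], some PySem.Dict.empty) := by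
        simp [pvStepA, hm, h2]
      have hB : pvStepB blocks raw = blocks ++ [[]] := by
        simp [pvStepB, hm]
      rw [hA, hB]
      refine ⟨fun hc => absurd hc (by simp), fun _ => ⟨?_, ?_⟩⟩
      · rw [List.dropLast_concat, h1]
        exact pvMapLast _ _ hb
      · simp [pvParseBlock]
    · have hB : pvStepB blocks raw = blocks.dropLast ++ [blocks.getLastD [] ++ [PySem.Str.strip raw]] := by
        simp [pvStepB, hm, hb]
      by_cases hkv : pvIsKV (PySem.Str.strip raw) = true
      · have hA : pvStepA st raw =
            (st.1, some ((pvParseBlock (blocks.getLastD [])).insert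
              (pvLineKV (PySem.Str.strip raw)).1 (pvLineKV (PySem.Str.strip raw)).2)) := by
          simp [pvStepA, hm, h2, hkv]
        rw [hA, hB]
        refine ⟨fun hc => absurd hc (by simp), fun _ => ⟨?_, ?_⟩⟩
        · rw [List.dropLast_concat]; exact h1
        · rw [List.getLastD_concat, pvParseBlock_concat, if_pos hkv]
      · have hA : pvStepA st raw = st := by
          simp [pvStepA, hm, h2, hkv]
        rw [hA, hB]
        refine ⟨fun hc => absurd hc (by simp), fun _ => ⟨?_, ?_⟩⟩
        · rw [List.dropLast_concat]; exact h1
        · rw [List.getLastD_concat, pvParseBlock_concat, if_neg (by simp [hkv])]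
          exact h2

theorem pvRel_foldl (ls : List String)
    (st : List (PySem.Dict String String) × Option (PySem.Dict String String))
    (blocks : List (List String)) (h : pvRel st blocks) :
    pvRel (ls.foldl pvStepA st) (ls.foldl pvStepB blocks) := by
  induction ls generalizing st blocks with
  | nil => exact h
  | cons l ls ih => exact ih _ _ (pvRel_step st blocks l h)

theorem pvRel_finalize (st : List (PySem.Dict String String) × Option (PySem.Dict String String))
    (blocks : List (List String)) (h : pvRel st blocks) :
    (match st.2 with
     | some d => st.1 ++ [d]
     | none => st.1) = blocks.map pvParseBlock := by
  by_cases hb : blocks = []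
  · subst hb
    obtain rfl : st = ([], none) := h.1 rfl
    rfl
  · obtain ⟨h1, h2⟩ := h.2 hb
    rw [h2]
    show st.1 ++ [pvParseBlock (blocks.getLastD [])] = _
    rw [h1]
    exact pvMapLast _ _ hb

-- ===== VERDICT (by name: the statement is the Claim_ definition above) =====
theorem parse_toml_rules_py_spec : Claim_equal_parse_toml_rules_py := by
  intro text _
  unfold Spec_parse_toml_rules_py parse_toml_rules_py parse_toml_rules_py_alt
  have h := pvRel_foldl (PySem.Str.splitlines text) ([], none) []
    ⟨fun _ => rfl, fun hne => absurd rfl hne⟩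
  simp only [pvRel_finalize _ _ h, List.map_map]
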